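-- pv_equiv track=rewrite | github.com/owl123/spw | spw-solver21.py | slots
-- ===== SOURCE A (Python) =====
-- def slots(grid, horiz):
--     R, C = len(grid), len(grid[0])
--     outer, inner = (R, C) if horiz else (C, R)
--     cell = (lambda i, j: grid[i][j]) if horiz else (lambda i, j: grid[j][i])
--     out = []
--     for i in range(outer):
--         run = 0
--         for j in range(inner):
--             if cell(i, j) is None:
--                 if run == 0:
--                     start = j
--                 run += 1
--             else:
--                 if run:
--                     out.append(((i, start) if horiz else (start, i), run, horiz))
--                     run = 0
--         if run:
--             out.append(((i, inner - run) if horiz else (inner - run, i), run, horiz))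
--     return out
-- ===== SOURCE B (Python) =====
-- def slots(grid, horiz):
--     R, C = len(grid), len(grid[0])
--     out = []
--     for i in range(R if horiz else C):
--         line = grid[i][:C] if horiz else [grid[j][i] for j in range(R)]
--         n = len(line)
--         p = 0
--         while p < n:
--             if line[p] is None:
--                 q = p
--                 while q < n and line[q] is None:
--                     q += 1
--                 out.append(((i, p) if horiz else (p, i), q - p, horiz))
--                 p = q
--             else:
--                 p += 1
--     return out
-- ===== Notes on version B (the rewrite author's own statement) =====
-- stated objective: alternative
-- what changed: B extracts each line as an explicit list and finds empty runs with a two-pointer scan (jump to next None, then extend the run and append it at once), replacing A's run/start accumulator with an end-of-line flush.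
import Mathlib
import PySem

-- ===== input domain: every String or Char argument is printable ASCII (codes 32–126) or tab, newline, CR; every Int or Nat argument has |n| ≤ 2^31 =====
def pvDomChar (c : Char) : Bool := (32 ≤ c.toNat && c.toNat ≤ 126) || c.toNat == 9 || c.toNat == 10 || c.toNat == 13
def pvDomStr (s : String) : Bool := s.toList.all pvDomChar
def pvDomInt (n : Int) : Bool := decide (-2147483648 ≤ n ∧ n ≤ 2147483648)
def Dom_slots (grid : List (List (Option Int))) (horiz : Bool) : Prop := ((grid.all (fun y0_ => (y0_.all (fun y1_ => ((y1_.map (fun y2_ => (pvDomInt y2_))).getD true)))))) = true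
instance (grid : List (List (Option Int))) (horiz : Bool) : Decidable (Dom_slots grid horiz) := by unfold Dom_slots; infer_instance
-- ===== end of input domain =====

-- B finds the empty runs of each explicitly-built line with a two-pointer scan instead of A's
-- run/start accumulator with an end-of-line flush (objective: alternative, same cost).
-- ===== PORT A =====
-- one step of A's inner loop: state = (out, run, start), c = cell(i,j)
def pvStepA (horiz : Bool) (i : Nat)
    (s : List ((Int × Int) × Int × Bool) × Nat × Nat) (c : Option Int) (j : Nat) :
    List ((Int × Int) × Int × Bool) × Nat × Nat :=
  match c with
  | none => if s.2.1 = 0 then (s.1, 1, j) else (s.1, s.2.1 + 1, s.2.2)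
  | some _ =>
      if s.2.1 ≠ 0 then
        (s.1 ++ [((if horiz then ((i : Int), (s.2.2 : Int)) else ((s.2.2 : Int), (i : Int))),
                  (s.2.1 : Int), horiz)], 0, s.2.2)
      else s

-- A's trailing flush after the inner loop
def pvFlushA (horiz : Bool) (i inner : Nat)
    (s : List ((Int × Int) × Int × Bool) × Nat × Nat) : List ((Int × Int) × Int × Bool) :=
  if s.2.1 ≠ 0 then
    s.1 ++ [((if horiz then ((i : Int), ((inner - s.2.1 : Nat) : Int))
              else (((inner - s.2.1 : Nat) : Int), (i : Int))), (s.2.1 : Int), horiz)]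
  else s.1

def slots (grid : List (List (Option Int))) (horiz : Bool) : List ((Int × Int) × Int × Bool) :=
  let R := grid.length
  let C := (grid.headD []).length
  let outer := if horiz then R else C
  let inner := if horiz then C else R
  (List.range outer).foldl (fun out i =>
    pvFlushA horiz i inner
      ((List.range inner).foldl (fun s j =>
          pvStepA horiz i s
            (if horiz then (grid.getD i []).getD j none else (grid.getD j []).getD i none) j)
        (out, 0, 0))) []

-- ===== PORT B =====
-- B's while-loop over one line: p = current position; on a None, q jumps past the whole run.
def pvLoopB (horiz : Bool) (i : Nat) :
    List (Option Int) → Nat → List ((Int × Int) × Int × Bool) → List ((Int × Int) × Int × Bool)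
  | [], _, out => out
  | some _ :: rest, p, out => pvLoopB horiz i rest (p + 1) out
  | none :: rest, p, out =>
      let k := 1 + (rest.takeWhile Option.isNone).length
      pvLoopB horiz i (rest.dropWhile Option.isNone) (p + k)
        (out ++ [((if horiz then ((i : Int), (p : Int)) else ((p : Int), (i : Int))),
                  (k : Int), horiz)])
  termination_by l => l.length
  decreasing_by all_goals simp [Nat.lt_succ_iff, List.length_dropWhile_le]

def slots_alt (grid : List (List (Option Int))) (horiz : Bool) : List ((Int × Int) × Int × Bool) :=
  let R := grid.length
  let C := (grid.headD []).length
  (List.range (if horiz then R else C)).foldl (fun out i =>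
    pvLoopB horiz i
      (if horiz then (grid.getD i []).take C
       else (List.range R).map (fun j => (grid.getD j []).getD i none)) 0 out) []

-- ===== PRECONDITION & SPEC =====
-- Pre_ excludes exactly the inputs on which Python A raises IndexError: the empty grid
-- (len(grid[0])) and ragged grids with a row shorter than the first row (cell access).
def Pre_slots (grid : List (List (Option Int))) (horiz : Bool) : Prop :=
  grid ≠ [] ∧ ∀ row ∈ grid, (grid.headD []).length ≤ row.length
instance (grid : List (List (Option Int))) (horiz : Bool) : Decidable (Pre_slots grid horiz) := by
  unfold Pre_slots; infer_instance

def pvWitness_slots : List (List (Option Int)) × Bool := ([[none, some 1], [none, none]], true)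

def Spec_slots (grid : List (List (Option Int))) (horiz : Bool) (out : List ((Int × Int) × Int × Bool)) : Prop := out = slots_alt grid horiz
instance (grid : List (List (Option Int))) (horiz : Bool) (out : List ((Int × Int) × Int × Bool)) : Decidable (Spec_slots grid horiz out) := by unfold Spec_slots; infer_instance

-- ===== CLAIM (what is proved, stated in full; the proofs are below) =====
def Claim_equal_slots : Prop := ∀ (grid : List (List (Option Int))) (horiz : Bool), Dom_slots grid horiz → Pre_slots grid horiz → Spec_slots grid horiz (slots grid horiz)
-- ===== LEMMAS AND PROOFS =====

-- proof-side view of A's inner loop as structural recursion over the line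
def pvGoA (horiz : Bool) (i : Nat) :
    List (Option Int) → Nat → (List ((Int × Int) × Int × Bool) × Nat × Nat) →
    List ((Int × Int) × Int × Bool) × Nat × Nat
  | [], _, s => s
  | c :: rest, j, s => pvGoA horiz i rest (j + 1) (pvStepA horiz i s c j)

-- proof-side list of runs (start, length) of a line, two-pointer style like pvLoopB
def pvRuns : List (Option Int) → Nat → List (Nat × Nat)
  | [], _ => []
  | some _ :: rest, p => pvRuns rest (p + 1)
  | none :: rest, p =>
      let k := 1 + (rest.takeWhile Option.isNone).length
      (p, k) :: pvRuns (rest.dropWhile Option.isNone) (p + k)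
  termination_by l => l.length
  decreasing_by all_goals simp [Nat.lt_succ_iff, List.length_dropWhile_le]

def pvMk (horiz : Bool) (i : Nat) (r : Nat × Nat) : (Int × Int) × Int × Bool :=
  ((if horiz then ((i : Int), (r.1 : Int)) else ((r.1 : Int), (i : Int))), (r.2 : Int), horiz)

theorem pvLoopB_eq (horiz : Bool) (i : Nat) (line : List (Option Int)) (p : Nat) :
    ∀ out, pvLoopB horiz i line p out = out ++ (pvRuns line p).map (pvMk horiz i) := by
  induction line, p using pvRuns.induct with
  | case1 p => intro out; simp [pvLoopB, pvRuns]
  | case2 v rest p ih => intro out; simp [pvLoopB, pvRuns, ih]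
  | case3 rest p k ih =>
      intro out
      simp only [pvLoopB, pvRuns]
      rw [ih]
      simp only [pvMk, List.map_cons, List.append_assoc, List.cons_append, List.nil_append]
      rfl

-- bridge: a foldl over range' with lookups equals the structural recursion over the line
theorem pvGoA_bridge (horiz : Bool) (i : Nat) (get : Nat → Option Int) :
    ∀ (line : List (Option Int)) (j0 : Nat) (s : List ((Int × Int) × Int × Bool) × Nat × Nat),
      (∀ k, k < line.length → get (j0 + k) = line.getD k none) →
      (List.range' j0 line.length).foldl
        (fun s j => pvStepA horiz i s (get j) j) s = pvGoA horiz i line j0 s := by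
  intro line
  induction line with
  | nil => intro j0 s h; simp [pvGoA]
  | cons c rest ih =>
      intro j0 s h
      have h0 : get j0 = c := by simpa using h 0 (by simp)
      simp only [List.length_cons, List.range'_succ, List.foldl_cons, h0, pvGoA]
      exact ih (j0 + 1) _ (by
        intro k hk
        have := h (k + 1) (by simpa using hk)
        simpa [Nat.add_comm, Nat.add_left_comm, Nat.add_assoc] using this)

-- four evaluation facts about one step of A's state machine
theorem pvStepA_none0 (horiz : Bool) (i j start : Nat) (out : List ((Int × Int) × Int × Bool)) :
    pvStepA horiz i (out, 0, start) none j = (out, 1, j) := rfl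

theorem pvStepA_some0 (horiz : Bool) (i j start : Nat) (v : Int)
    (out : List ((Int × Int) × Int × Bool)) :
    pvStepA horiz i (out, 0, start) (some v) j = (out, 0, start) := rfl

theorem pvStepA_noneR (horiz : Bool) (i j start run : Nat) (hr : run ≠ 0)
    (out : List ((Int × Int) × Int × Bool)) :
    pvStepA horiz i (out, run, start) none j = (out, run + 1, start) := by
  simp [pvStepA, hr]

theorem pvStepA_someR (horiz : Bool) (i j start run : Nat) (hr : run ≠ 0) (v : Int)
    (out : List ((Int × Int) × Int × Bool)) :
    pvStepA horiz i (out, run, start) (some v) j =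
      (out ++ [pvMk horiz i (start, run)], 0, start) := by
  simp [pvStepA, hr, pvMk]

-- the central invariant: A's state machine produces exactly B's runs
theorem pvGoA_runs (horiz : Bool) (i : Nat) :
    ∀ (line : List (Option Int)) (j : Nat) (out : List ((Int × Int) × Int × Bool))
      (start inner : Nat),
      j + line.length = inner →
      (pvFlushA horiz i inner (pvGoA horiz i line j (out, 0, start)) =
          out ++ (pvRuns line j).map (pvMk horiz i)) ∧
      (∀ run, run ≠ 0 → start + run = j →
        pvFlushA horiz i inner (pvGoA horiz i line j (out, run, start)) =
          out ++ ((start, run + (line.takeWhile Option.isNone).length) ::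
            pvRuns (line.dropWhile Option.isNone)
              (j + (line.takeWhile Option.isNone).length)).map (pvMk horiz i)) := by
  intro line
  induction line with
  | nil =>
      intro j out start inner hinner
      constructor
      · simp [pvGoA, pvFlushA, pvRuns]
      · intro run hr hsr
        simp only [List.length_nil, Nat.add_zero] at hinner
        subst hinner
        simp only [pvGoA, pvFlushA, pvRuns, List.takeWhile_nil, List.dropWhile_nil]
        have hstart : j - run = start := by omega
        simp [hr, pvMk, hstart]
  | cons c rest ih =>
      intro j out start inner hinner
      have hinner' : (j + 1) + rest.length = inner := by
        simp only [List.length_cons] at hinner; omega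
      constructor
      · cases c with
        | none =>
            have h1 := (ih (j + 1) out j inner hinner').2 1 (by omega) (by omega)
            simp only [pvGoA, pvStepA_none0]
            rw [h1]
            simp [pvRuns, Nat.add_comm, Nat.add_left_comm, Nat.add_assoc]
        | some v =>
            have h0 := (ih (j + 1) out start inner hinner').1
            simp only [pvGoA, pvStepA_some0]
            rw [h0]
            simp [pvRuns]
      · intro run hr hsr
        cases c with
        | none =>
            have h1 := (ih (j + 1) out start inner hinner').2 (run + 1) (by omega) (by omega)
            simp only [pvGoA, pvStepA_noneR horiz i j start run hr]
            rw [h1]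
            simp [Nat.add_comm, Nat.add_left_comm, Nat.add_assoc]
        | some v =>
            have h0 := (ih (j + 1) (out ++ [pvMk horiz i (start, run)]) start inner hinner').1
            simp only [pvGoA, pvStepA_someR horiz i j start run hr]
            rw [h0]
            simp [pvRuns, pvMk]

-- per-line equality: A's flushed fold over one line equals B's two-pointer loop
theorem pvLine_gen (horiz : Bool) (i inner : Nat) (get : Nat → Option Int)
    (line : List (Option Int)) (hlen : line.length = inner)
    (hget : ∀ k, k < inner → get k = line.getD k none)
    (out : List ((Int × Int) × Int × Bool)) :
    pvFlushA horiz i inner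
      ((List.range inner).foldl (fun s j => pvStepA horiz i s (get j) j) (out, 0, 0)) =
    pvLoopB horiz i line 0 out := by
  subst hlen
  rw [List.range_eq_range',
    pvGoA_bridge horiz i get line 0 _ (by intro k hk; simpa using hget k hk), pvLoopB_eq]
  exact (pvGoA_runs horiz i line 0 out 0 line.length (by omega)).1

-- ===== VERDICT (by name: the statement is the Claim_ definition above) =====
theorem slots_spec : Claim_equal_slots := by
  intro grid horiz _hdom hpre
  obtain ⟨hne, hlen⟩ := hpre
  unfold Spec_slots slots slots_alt
  apply PySem.List.foldl_congr_mem
  intro acc i hiMem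
  rw [List.mem_range] at hiMem
  cases horiz with
  | true =>
      simp only [reduceIte] at hiMem ⊢
      have hrow : grid.getD i [] ∈ grid := by
        have : grid.getD i [] = grid[i] := by
          simp [List.getD, List.getElem?_eq_getElem hiMem]
        rw [this]
        exact List.getElem_mem hiMem
      have hCle : (grid.headD []).length ≤ (grid.getD i []).length := hlen _ hrow
      refine pvLine_gen true i _ _ _ ?_ ?_ acc
      · rw [List.length_take]
        exact Nat.min_eq_left hCle
      · intro k hk
        simp only [List.getD_eq_getElem?_getD]
        rw [List.getElem?_take_of_lt hk]
  | false =>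
      simp only [Bool.false_eq_true, reduceIte] at hiMem ⊢
      refine pvLine_gen false i _ _ _ (by simp) ?_ acc
      · intro k hk
        rw [List.getD_eq_getElem?_getD]
        simp [hk]
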